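-- pv_equiv track=rewrite | github.com/adampehrson/Kattis | venv/bin/HelpmeGame.py | revwhite
-- ===== SOURCE A (Python) =====
-- def revwhite(lst):
--     x = 1
--     temp = list()
--     while x < 9:
--         for y in lst:
--             if y[2] == str(x):
--                 temp.append(y)
--         x += 1
--     return temp
-- ===== SOURCE B (Python) =====
-- def revwhite(lst):
--     buckets = {}
--     out = []
--     for y in lst:
--         c = y[2]
--         if '1' <= c <= '8':
--             buckets[c] = buckets.get(c, []) + [y]
--     for d in "12345678":
--         out.extend(buckets.get(d, []))
--     return out
-- ===== Notes on version B (the rewrite author's own statement) =====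
-- stated objective: faster
-- what changed: Replaces A's eight full rescans of the list (one per digit '1'..'8') with a single bucketing pass that groups elements by y[2] into a dict of lists and then concatenates the eight buckets in digit order.
import Mathlib
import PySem

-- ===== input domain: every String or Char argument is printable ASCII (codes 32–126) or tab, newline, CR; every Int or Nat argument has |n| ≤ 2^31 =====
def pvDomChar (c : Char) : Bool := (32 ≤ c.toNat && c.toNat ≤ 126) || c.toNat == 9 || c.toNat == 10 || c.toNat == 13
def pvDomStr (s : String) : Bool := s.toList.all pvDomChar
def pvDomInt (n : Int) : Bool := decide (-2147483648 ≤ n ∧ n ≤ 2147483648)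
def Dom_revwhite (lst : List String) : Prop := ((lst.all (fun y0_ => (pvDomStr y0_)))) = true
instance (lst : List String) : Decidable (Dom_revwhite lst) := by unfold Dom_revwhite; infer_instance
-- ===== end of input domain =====

-- ===== PORT A =====
-- Header: B buckets elements by y[2] in one pass instead of A's eight rescans (objective: faster, constant factor).
-- Port of A: while x < 9 over x = 1..8, each pass scanning lst and appending matches of y[2] == str(x).
def revwhite (lst : List String) : List String :=
  (PySem.List.pyRange 1 9 1).foldl (fun temp x =>
    lst.foldl (fun temp y =>
      if ((PySem.Str.pyGet? y 2).map (fun c => String.ofList [c]) == some (PySem.Int.toStr x))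
      then temp ++ [y] else temp) temp) []

-- ===== PORT B =====
-- Port of B: one pass filling a dict of buckets keyed by y[2] ('1'..'8'), then concatenation in digit order.
def revwhite_alt (lst : List String) : List String :=
  let buckets : PySem.Dict Char (List String) :=
    lst.foldl (fun d y =>
      match PySem.Str.pyGet? y 2 with
      | some c => if '1' ≤ c ∧ c ≤ '8' then d.modify c [] (· ++ [y]) else d
      | none => d) PySem.Dict.empty
  ("12345678".toList).foldl (fun out dch => out ++ buckets.getD dch []) []

-- ===== PRECONDITION & SPEC =====
-- Pre_ excludes exactly the inputs where Python raises IndexError: some element shorter than 3 characters (y[2]).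
def Pre_revwhite (lst : List String) : Prop := ∀ y ∈ lst, 3 ≤ y.toList.length
instance (lst : List String) : Decidable (Pre_revwhite lst) := by unfold Pre_revwhite; infer_instance
def pvWitness_revwhite : List String := ["ab1", "cd9x", "ef2", "gh1"]
def Spec_revwhite (lst : List String) (out : List String) : Prop := out = revwhite_alt lst
instance (lst : List String) (out : List String) : Decidable (Spec_revwhite lst out) := by unfold Spec_revwhite; infer_instance

-- ===== CLAIM (what is proved, stated in full; the proofs are below) =====
def Claim_equal_revwhite : Prop := ∀ (lst : List String), Dom_revwhite lst → Pre_revwhite lst → Spec_revwhite lst (revwhite lst)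

-- ===== LEMMAS AND PROOFS =====

-- the bucket dict after B's pass: bucket c holds, in order, the elements with y[2] = c (for c in '1'..'8')
theorem revwhite_bucket_getD (lst : List String) (d : PySem.Dict Char (List String))
    (c : Char) (hc : '1' ≤ c ∧ c ≤ '8') :
    (lst.foldl (fun d y =>
      match PySem.Str.pyGet? y 2 with
      | some c => if '1' ≤ c ∧ c ≤ '8' then d.modify c [] (· ++ [y]) else d
      | none => d) d).getD c []
    = d.getD c [] ++ lst.filter (fun y => PySem.Str.pyGet? y 2 == some c) := by
  induction lst generalizing d with
  | nil => simp
  | cons y tl ih =>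
    cases h : PySem.Str.pyGet? y 2 with
    | none => simp only [List.foldl_cons, List.filter_cons, h, ih]; simp
    | some c' =>
      by_cases hg : '1' ≤ c' ∧ c' ≤ '8'
      · by_cases hcc : c' = c
        · subst hcc
          simp only [List.foldl_cons, List.filter_cons, h, if_pos hg, ih,
            PySem.Dict.getD_modify]
          simp [List.append_assoc]
        · simp only [List.foldl_cons, List.filter_cons, h, if_pos hg, ih,
            PySem.Dict.getD_modify, if_neg (Ne.symm hcc)]
          simp [hcc]
      · have hcc : c' ≠ c := fun he => hg (he ▸ hc)
        simp only [List.foldl_cons, List.filter_cons, h, if_neg hg, ih]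
        simp [hcc]

-- A's predicate (comparing the one-char string y[2] with str(x)) coincides with B's per-digit test
theorem revwhite_pred_eq (y : String) (c : Char) :
    ((PySem.Str.pyGet? y 2).map (fun c' => String.ofList [c']) == some (String.ofList [c]))
    = (PySem.Str.pyGet? y 2 == some c) := by
  cases h : PySem.Str.pyGet? y 2 with
  | none => rfl
  | some c' => simp [String.ext_iff, String.toList_ofList]

-- ===== VERDICT (by name: the statement is the Claim_ definition above) =====
theorem revwhite_spec : Claim_equal_revwhite := by
  intro lst _ _
  show revwhite lst = revwhite_alt lst
  unfold revwhite revwhite_alt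
  have hr : PySem.List.pyRange 1 9 1 = [1,2,3,4,5,6,7,8] := by decide
  have hs : ("12345678".toList) = ['1','2','3','4','5','6','7','8'] := by decide
  rw [hr, hs]
  simp only [List.foldl_cons, List.foldl_nil]
  have hinner : ∀ (x : Int) (c : Char) (acc : List String), PySem.Int.toStr x = String.ofList [c] →
      lst.foldl (fun temp y =>
        if ((PySem.Str.pyGet? y 2).map (fun c' => String.ofList [c']) == some (PySem.Int.toStr x))
        then temp ++ [y] else temp) acc
      = acc ++ lst.filter (fun y => PySem.Str.pyGet? y 2 == some c) := by
    intro x c acc hx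
    rw [show (fun temp y =>
        if ((PySem.Str.pyGet? y 2).map (fun c' => String.ofList [c']) == some (PySem.Int.toStr x))
        then temp ++ [y] else temp)
      = (fun temp y => if (PySem.Str.pyGet? y 2 == some c) then temp ++ [y] else temp) from ?_,
      PySem.List.foldl_append_if_eq_filter]
    funext temp y
    rw [hx, revwhite_pred_eq]
  rw [hinner 1 '1' _ (by decide), hinner 2 '2' _ (by decide), hinner 3 '3' _ (by decide),
      hinner 4 '4' _ (by decide), hinner 5 '5' _ (by decide), hinner 6 '6' _ (by decide),
      hinner 7 '7' _ (by decide), hinner 8 '8' _ (by decide)]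
  rw [revwhite_bucket_getD lst _ '1' (by decide), revwhite_bucket_getD lst _ '2' (by decide),
      revwhite_bucket_getD lst _ '3' (by decide), revwhite_bucket_getD lst _ '4' (by decide),
      revwhite_bucket_getD lst _ '5' (by decide), revwhite_bucket_getD lst _ '6' (by decide),
      revwhite_bucket_getD lst _ '7' (by decide), revwhite_bucket_getD lst _ '8' (by decide)]
  simp [PySem.Dict.getD, List.append_assoc]
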